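-- pv_equiv track=rewrite | github.com/rba100/AoC | 2023/12.py | getValidOffsets
-- ===== SOURCE A (Python) =====
-- def getValidOffsets(pattern: str, run: int) -> ([int]):
--     validOffsets = []
--     for offset in range(len(pattern) - run + 1):
--         segment = pattern[offset:offset+run]
--         if len([c for c in segment if c == "."]): continue
--         beforeSegment = pattern[:offset]
--         afterSegment = pattern[offset+run:]
--         if "#" in str(beforeSegment): break
--         if "#" in str(afterSegment[:1]): continue
--         validOffsets.append(offset)
--     return validOffsets
-- ===== SOURCE B (Python) =====
-- def getValidOffsets(pattern: str, run: int) -> ([int]):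
--     L = len(pattern)
--     dots = [0] * (L + 1)
--     for i, c in enumerate(pattern):
--         dots[i + 1] = dots[i] + (c == '.')
--     firstHash = pattern.find('#')
--     if firstHash == -1:
--         firstHash = L
--     limit = min(L - run, firstHash)
--     return [o for o in range(limit + 1)
--             if dots[o + run] == dots[o]
--             and (L <= o + run or pattern[o + run] != '#')]
-- ===== Notes on version B (the rewrite author's own statement) =====
-- stated objective: faster
-- what changed: Replaces the per-offset segment scan and prefix/suffix substring searches with a dot-count prefix-sum array and a single find('#') that caps the offset range, so each offset is checked in O(1) by one filter pass.
-- outside the precondition, e.g. on getValidOffsets('..', -2): A returns [0, 1, 2, 3, 4], B returns []; on getValidOffsets('##', -3): A returns [], B raises IndexError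
import Mathlib
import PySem

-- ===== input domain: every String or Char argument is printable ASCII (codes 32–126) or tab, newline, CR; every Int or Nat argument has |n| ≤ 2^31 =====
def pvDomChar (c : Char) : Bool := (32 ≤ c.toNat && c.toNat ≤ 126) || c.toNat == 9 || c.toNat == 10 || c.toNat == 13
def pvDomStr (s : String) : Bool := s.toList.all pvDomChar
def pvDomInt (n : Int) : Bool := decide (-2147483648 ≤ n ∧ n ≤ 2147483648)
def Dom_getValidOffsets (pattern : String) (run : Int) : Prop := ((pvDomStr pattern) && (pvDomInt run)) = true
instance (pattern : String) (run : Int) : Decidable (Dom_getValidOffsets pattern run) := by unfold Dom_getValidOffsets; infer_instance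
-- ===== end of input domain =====

-- B replaces A's per-offset segment scan and substring searches by a dot prefix-sum array
-- and a single find('#') capping the offset range (objective: faster, one O(L) pass).


-- ===== PORT A =====
-- the for-loop with continue/break, as structural recursion over the remaining offsets
def pvLoopA (cs : List Char) (run : Int) (acc : List Int) : List Int → List Int
  | [] => acc
  | offset :: rest =>
    let segment := PySem.List.slice cs (some offset) (some (offset + run))
    if (segment.filter (fun c => c == '.')).length ≠ 0 then pvLoopA cs run acc rest
    else
      let beforeSegment := PySem.List.slice cs none (some offset)
      let afterSegment := PySem.List.slice cs (some (offset + run)) none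
      if PySem.Chars.isIn ['#'] beforeSegment then acc
      else if PySem.Chars.isIn ['#'] (PySem.List.slice afterSegment none (some 1)) then
        pvLoopA cs run acc rest
      else pvLoopA cs run (acc ++ [offset]) rest

def getValidOffsets (pattern : String) (run : Int) : List Int :=
  pvLoopA pattern.toList run []
    (PySem.List.pyRange 0 ((pattern.toList.length : Int) - run + 1) 1)

-- ===== PORT B =====
-- dots[i] = number of '.' among the first i chars (Source B's prefix-sum loop as a scan)
def pvDots (acc : Int) : List Char → List Int
  | [] => [acc]
  | c :: rest => acc :: pvDots (acc + if c == '.' then 1 else 0) rest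

def getValidOffsets_alt (pattern : String) (run : Int) : List Int :=
  let cs := pattern.toList
  let L : Int := cs.length
  let dots := pvDots 0 cs
  let f := PySem.Str.find pattern "#"
  let firstHash := if f = -1 then L else f
  let limit := min (L - run) firstHash
  (PySem.List.pyRange 0 (limit + 1) 1).filter (fun o =>
    (PySem.List.pyGetD dots (o + run) 0 == PySem.List.pyGetD dots o 0) &&
    (decide (L ≤ o + run) || !(PySem.List.pyGetD cs (o + run) ' ' == '#')))

-- ===== PRECONDITION & SPEC =====
-- Pre_ excludes run < 0, outside the natural domain (run is a block length): there A's value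
-- is an artefact of Python's negative-slice wraparound and B may even raise (see claim cites).
def Pre_getValidOffsets (pattern : String) (run : Int) : Prop := 0 ≤ run
instance (pattern : String) (run : Int) : Decidable (Pre_getValidOffsets pattern run) := by unfold Pre_getValidOffsets; infer_instance
def pvWitness_getValidOffsets : String × Int := ("?.#?", 2)

def Spec_getValidOffsets (pattern : String) (run : Int) (out : List Int) : Prop := out = getValidOffsets_alt pattern run
instance (pattern : String) (run : Int) (out : List Int) : Decidable (Spec_getValidOffsets pattern run out) := by unfold Spec_getValidOffsets; infer_instance

-- ===== CLAIM (what is proved, stated in full; the proofs are below) =====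
def Claim_equal_getValidOffsets : Prop := ∀ (pattern : String) (run : Int), Dom_getValidOffsets pattern run → Pre_getValidOffsets pattern run → Spec_getValidOffsets pattern run (getValidOffsets pattern run)

-- ===== LEMMAS AND PROOFS =====

-- the common description of one offset's validity, on the Nat side
def pvGood (cs : List Char) (r o : Nat) : Bool :=
  ((((cs.drop o).take r).filter (fun c => c == '.')).length == 0)
  && !((cs.take o).contains '#')
  && !(((cs.drop (o + r)).take 1).contains '#')

lemma pv_singleton_infix (l : List Char) : ['#'] <:+: l ↔ '#' ∈ l := by
  constructor
  · intro h; exact h.sublist.subset (List.mem_singleton_self _)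
  · intro h
    obtain ⟨s, t, rfl⟩ := List.append_of_mem h
    exact ⟨s, t, by simp⟩

lemma pv_isIn_singleton (l : List Char) : PySem.Chars.isIn ['#'] l = l.contains '#' := by
  rw [Bool.eq_iff_iff, PySem.Chars.isIn_iff_infix, pv_singleton_infix, List.contains_iff_mem]

lemma pvDots_get (cs : List Char) : ∀ (a : Int) (n : Nat), n ≤ cs.length →
    (pvDots a cs)[n]? = some (a + (((cs.take n).filter (fun c => c == '.')).length : Int)) := by
  induction cs with
  | nil =>
    intro a n h
    have hn : n = 0 := by simpa using h
    subst hn; simp [pvDots]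
  | cons c rest ih =>
    intro a n h
    cases n with
    | zero => simp [pvDots]
    | succ m =>
      simp only [pvDots, List.getElem?_cons_succ]
      rw [ih _ m (by simpa using h)]
      by_cases hc : c = '.' <;> simp [hc] <;> ring

-- first-'#' index: membership in a prefix vs. the value B computes from find
def pvFH (cs : List Char) : Int :=
  if PySem.Chars.find cs ['#'] = -1 then (cs.length : Int) else PySem.Chars.find cs ['#']

lemma pv_prefix_singleton {l : List Char} : ['#'] <+: l ↔ l.head? = some '#' := by
  cases l with
  | nil => simp
  | cons x xs => simp [List.cons_prefix_cons]; exact eq_comm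

lemma pvFH_nonneg (cs : List Char) : 0 ≤ pvFH cs := by
  unfold pvFH
  split_ifs with h
  · positivity
  · have := PySem.Chars.neg_one_le_find cs ['#']
    omega

lemma pvFH_spec (cs : List Char) (o : Nat) (ho : o ≤ cs.length) :
    '#' ∈ cs.take o ↔ pvFH cs < (o : Int) := by
  unfold pvFH
  split_ifs with h
  · rw [PySem.Chars.find_eq_neg_one_iff, pv_singleton_infix] at h
    constructor
    · intro hm; exact absurd (List.mem_of_mem_take hm) h
    · intro hlt; exact absurd hlt (by omega)
  · have hnn : 0 ≤ PySem.Chars.find cs ['#'] := by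
      have := PySem.Chars.neg_one_le_find cs ['#']; omega
    obtain ⟨hpre, hmin⟩ := PySem.Chars.find_spec hnn
    set j := (PySem.Chars.find cs ['#']).toNat with hj
    rw [pv_prefix_singleton] at hpre
    have hjlt : j < cs.length := by
      by_contra hge
      rw [List.drop_eq_nil_of_le (by omega)] at hpre
      simp at hpre
    have hcsj : cs[j]? = some '#' := by
      rwa [List.head?_drop] at hpre
    constructor
    · intro hm
      obtain ⟨i, hi, hci⟩ := List.mem_iff_getElem.mp hm
      have hilen : i < cs.length := by
        have hi' : i < min o cs.length := by simpa using hi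
        omega
      have : ¬ (['#'] <+: cs.drop i) ∨ j ≤ i := by
        by_cases hij : i < j
        · exact Or.inl (hmin i hij)
        · exact Or.inr (by omega)
      rcases this with hnp | hle
      · exfalso
        apply hnp
        rw [pv_prefix_singleton, List.head?_drop]
        rw [List.getElem_take] at hci
        simp [hilen, hci]
      · have hio : i < o := by
          have hi' : i < min o cs.length := by simpa using hi
          omega
        omega
    · intro hlt
      have hjo : j < o := by omega
      refine List.mem_iff_getElem.mpr ⟨j, ?_, ?_⟩
      · simp; omega
      · have := hcsj
        rw [List.getElem?_eq_some_iff] at this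
        obtain ⟨hh, hv⟩ := this
        rw [List.getElem_take]
        exact hv

-- the break-aware loop of A, over an ascending offset list, is a filter by pvGood
lemma pvLoopA_spec (cs : List Char) (r : Nat) :
    ∀ (l : List Nat) (acc : List Int),
      l.Pairwise (· ≤ ·) → (∀ o ∈ l, o + r ≤ cs.length) →
      pvLoopA cs (r : Int) acc (l.map (fun n => Int.ofNat n)) =
        acc ++ (l.filter (pvGood cs r)).map (fun n => Int.ofNat n) := by
  intro l
  induction l with
  | nil => intro acc _ _; simp [pvLoopA]
  | cons o rest ih =>
    intro acc hpw hb
    have hor : o + r ≤ cs.length := hb o (by simp)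
    have hpw' := (List.pairwise_cons.mp hpw).2
    have hmem := (List.pairwise_cons.mp hpw).1
    simp only [Int.ofNat_eq_natCast] at ih
    rw [List.map_cons]
    rw [pvLoopA]
    simp only [Int.ofNat_eq_natCast]
    rw [PySem.List.slice_natCast_add, PySem.List.slice_to_natCast,
        show ((o : Int) + (r : Int)) = ((o + r : Nat) : Int) by push_cast; ring,
        PySem.List.slice_from_natCast,
        show (1 : Int) = ((1 : Nat) : Int) by norm_num,
        PySem.List.slice_to_natCast]
    rw [pv_isIn_singleton, pv_isIn_singleton]
    by_cases h1 : (((cs.drop o).take r).filter (fun c => c == '.')).length ≠ 0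
    · rw [if_pos h1, ih acc hpw' (fun x hx => hb x (by simp [hx]))]
      have hg : pvGood cs r o = false := by
        unfold pvGood
        have hb : ((((cs.drop o).take r).filter (fun c => c == '.')).length == 0) = false := by
          simpa using h1
        rw [hb]; rfl
      rw [List.filter_cons_of_neg (by simp [hg])]
    · rw [if_neg h1]
      by_cases h2 : (cs.take o).contains '#'
      · rw [if_pos h2]
        have hrest : rest.filter (pvGood cs r) = [] := by
          rw [List.filter_eq_nil_iff]
          intro x hx
          have hox : o ≤ x := hmem x hx
          have hxr : x + r ≤ cs.length := hb x (by simp [hx])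
          have hmo : '#' ∈ cs.take o := by simpa using h2
          have hmx : '#' ∈ cs.take x := by
            have := (pvFH_spec cs o (by omega)).mp hmo
            exact (pvFH_spec cs x (by omega)).mpr (by omega)
          have hcx : (cs.take x).contains '#' = true := List.contains_iff_mem.mpr hmx
          unfold pvGood
          rw [hcx]
          simp
        have hgo : pvGood cs r o = false := by
          unfold pvGood
          rw [h2]
          simp
        rw [List.filter_cons_of_neg (by simp [hgo]), hrest]
        simp
      · rw [if_neg h2]
        by_cases h3 : ((cs.drop (o + r)).take 1).contains '#'
        · rw [if_pos h3, ih acc hpw' (fun x hx => hb x (by simp [hx]))]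
          have hgf : pvGood cs r o = false := by
            unfold pvGood
            rw [h3]
            simp
          rw [List.filter_cons_of_neg (by simp [hgf])]
        · rw [if_neg h3, ih (acc ++ [(o : Int)]) hpw' (fun x hx => hb x (by simp [hx]))]
          have hgt : pvGood cs r o = true := by
            unfold pvGood
            have l0 : (((cs.drop o).take r).filter (fun c => c == '.')).length = 0 :=
              not_ne_iff.mp h1
            have e1 : ((((cs.drop o).take r).filter (fun c => c == '.')).length == 0) = true := by
              simp [l0]
            have e2 : ((cs.take o).contains '#') = false := by simpa using h2
            have e3 : (((cs.drop (o + r)).take 1).contains '#') = false := by simpa using h3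
            rw [e1, e2, e3]
            rfl
          rw [List.filter_cons_of_pos (by simp [hgt])]
          simp
  
-- B's per-offset boolean equals pvGood with the prefix condition stripped (o ≤ firstHash is
-- guaranteed by B's range cap)
lemma pv_b_cond (cs : List Char) (r o : Nat) (hor : o + r ≤ cs.length) :
    ((PySem.List.pyGetD (pvDots 0 cs) ((o : Int) + (r : Int)) 0 ==
        PySem.List.pyGetD (pvDots 0 cs) (o : Int) 0) &&
     (decide ((cs.length : Int) ≤ (o : Int) + (r : Int)) ||
        !(PySem.List.pyGetD cs ((o : Int) + (r : Int)) ' ' == '#'))) =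
    ((((cs.drop o).take r).filter (fun c => c == '.')).length == 0
      && !(((cs.drop (o + r)).take 1).contains '#')) := by
  have hcast : ((o : Int) + (r : Int)) = ((o + r : Nat) : Int) := by push_cast; ring
  rw [hcast, PySem.List.pyGetD_natCast, PySem.List.pyGetD_natCast, PySem.List.pyGetD_natCast]
  congr 1
  · -- dot-count condition
    rw [List.getD_eq_getElem?_getD, List.getD_eq_getElem?_getD,
        pvDots_get cs 0 (o + r) hor, pvDots_get cs 0 o (by omega)]
    have hsplit : cs.take (o + r) = cs.take o ++ (cs.drop o).take r := by
      rw [← List.take_add]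
    rw [hsplit, List.filter_append, List.length_append]
    simp only [Option.getD_some, zero_add]
    rw [Bool.eq_iff_iff, beq_iff_eq, beq_iff_eq]
    push_cast
    omega
  · -- next-char condition
    by_cases hlt : o + r < cs.length
    · have hdrop : cs.drop (o + r) = cs[o + r] :: cs.drop (o + r + 1) :=
        List.drop_eq_getElem_cons hlt
      rw [hdrop]
      rw [List.getD_eq_getElem?_getD, List.getElem?_eq_getElem hlt]
      simp only [List.take_succ_cons, List.take_zero, Option.getD_some]
      have hd : decide ((cs.length : Int) ≤ ((o + r : Nat) : Int)) = false := by
        simp only [decide_eq_false_iff_not, Nat.cast_le, not_le]; omega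
      rw [hd]
      have hc : ([cs[o + r]].contains '#') = (cs[o + r] == '#') := by
        by_cases h' : cs[o + r] = '#'
        · simp [h']
        · have h2 : ¬('#' = cs[o + r]) := fun he => h' he.symm
          simp [h', h2]
      rw [hc]
      simp
    · have heq : o + r = cs.length := by omega
      rw [List.drop_eq_nil_of_le (by omega)]
      have hd : decide ((cs.length : Int) ≤ ((o + r : Nat) : Int)) = true := by
        simp only [decide_eq_true_eq, Nat.cast_le]; omega
      rw [hd]
      simp

lemma pv_range_cast (n : Nat) :
    PySem.List.pyRange 0 (n : Int) 1 = (List.range n).map (fun k => Int.ofNat k) := by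
  rw [PySem.List.pyRange_one]
  rw [show ((n : Int) - 0).toNat = n by omega]
  exact List.map_congr_left (fun k _ => by simp [Int.ofNat_eq_natCast])

-- capping the range at the first '#' replaces A's prefix test and break
lemma pv_filter_cap (cs : List Char) (r : Nat) (hr : r ≤ cs.length) :
    (List.range (cs.length - r + 1)).filter (pvGood cs r) =
      (List.range (min (cs.length - r) (pvFH cs).toNat + 1)).filter
        (fun o => ((((cs.drop o).take r).filter (fun c => c == '.')).length == 0)
          && !(((cs.drop (o + r)).take 1).contains '#')) := by
  set k := cs.length - r with hk
  set fh := (pvFH cs).toNat with hfh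
  have hfhc : pvFH cs = (fh : Int) := (Int.toNat_of_nonneg (pvFH_nonneg cs)).symm
  have hco : ∀ o : Nat, o ≤ cs.length → ((cs.take o).contains '#' = false ↔ o ≤ fh) := by
    intro o ho
    have hmem := pvFH_spec cs o ho
    rw [hfhc] at hmem
    constructor
    · intro hc
      by_contra hgt
      have hm : '#' ∈ cs.take o := hmem.mpr (by omega)
      rw [← List.contains_iff_mem, hc] at hm
      exact Bool.false_ne_true hm
    · intro hle
      cases hcb : (cs.take o).contains '#'
      · rfl
      · have := hmem.mp (List.contains_iff_mem.mp hcb)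
        push_cast at this
        omega
  by_cases hkf : k ≤ fh
  · rw [min_eq_left hkf]
    apply List.filter_congr
    intro o ho
    have ho' : o ≤ k := Nat.lt_succ_iff.mp (List.mem_range.mp ho)
    have hcf : (cs.take o).contains '#' = false := (hco o (by omega)).mpr (by omega)
    unfold pvGood
    rw [hcf]
    simp
  · rw [not_le] at hkf
    rw [min_eq_right (by omega)]
    have hsplit : k + 1 = (fh + 1) + (k - fh) := by omega
    rw [hsplit, List.range_add, List.filter_append]
    have hfl : cs.length - r ≤ cs.length := by omega
    have h2 : (List.filter (pvGood cs r)
        (List.map (fun x => (fh + 1) + x) (List.range (k - fh)))) = [] := by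
      rw [List.filter_eq_nil_iff]
      intro x hx
      obtain ⟨y, hy, rfl⟩ := List.mem_map.mp hx
      have hyk : fh + 1 + y ≤ k := by
        have := List.mem_range.mp hy
        omega
      have hct : (cs.take (fh + 1 + y)).contains '#' = true := by
        cases hcb : (cs.take (fh + 1 + y)).contains '#'
        · exact absurd ((hco _ (by omega)).mp hcb) (by omega)
        · rfl
      unfold pvGood
      rw [hct]
      simp
    rw [h2, List.append_nil]
    apply List.filter_congr
    intro o ho
    have ho' : o ≤ fh := Nat.lt_succ_iff.mp (List.mem_range.mp ho)
    have hcf : (cs.take o).contains '#' = false := (hco o (by omega)).mpr ho'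
    unfold pvGood
    rw [hcf]
    simp

-- ===== VERDICT (by name: the statement is the Claim_ definition above) =====
theorem getValidOffsets_spec : Claim_equal_getValidOffsets := by
  intro pattern run _ hpre
  obtain ⟨r, rfl⟩ := Int.eq_ofNat_of_zero_le hpre
  unfold Spec_getValidOffsets
  simp only [getValidOffsets, getValidOffsets_alt, PySem.Str.find_eq]
  rw [show ("#" : String).toList = ['#'] from rfl]
  set cs := pattern.toList with hcs
  by_cases hr : r ≤ cs.length
  · -- r fits: both sides are a filtered range
    set k := cs.length - r with hk
    set fh := (pvFH cs).toNat with hfh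
    have hfhc : pvFH cs = (fh : Int) := (Int.toNat_of_nonneg (pvFH_nonneg cs)).symm
    -- A side
    rw [show ((cs.length : Int)) - (r : Int) + 1 = ((k + 1 : Nat) : Int) by push_cast; omega]
    rw [pv_range_cast (k + 1)]
    rw [pvLoopA_spec cs r (List.range (k + 1)) [] List.pairwise_le_range
          (fun o ho => by have := List.mem_range.mp ho; omega)]
    rw [List.nil_append]
    -- B side
    rw [show (if PySem.Chars.find cs ['#'] = -1 then ((cs.length : Nat) : Int)
          else PySem.Chars.find cs ['#']) = pvFH cs from rfl]
    rw [show ((cs.length : Int)) - (r : Int) = ((k : Nat) : Int) by omega]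
    rw [hfhc, ← Nat.cast_min]
    rw [show ((min k fh : Nat) : Int) + 1 = ((min k fh + 1 : Nat) : Int) by push_cast; omega]
    rw [pv_range_cast (min k fh + 1)]
    rw [List.filter_map]
    congr 1
    rw [pv_filter_cap cs r hr, ← hk, ← hfh]
    apply List.filter_congr
    intro o ho
    have ho' : o ≤ min k fh := Nat.lt_succ_iff.mp (List.mem_range.mp ho)
    have hor : o + r ≤ cs.length := by omega
    simp only [Function.comp, Int.ofNat_eq_natCast]
    exact (pv_b_cond cs r o hor).symm
  · -- r does not fit: both ranges are empty
    rw [not_le] at hr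
    rw [PySem.List.pyRange_one_eq_nil (a := 0)
          (by have h2 : (cs.length : Int) < (r : Int) := Int.ofNat_lt.mpr hr; omega)]
    rw [PySem.List.pyRange_one_eq_nil (a := 0)
          (by
            have h1 := min_le_left ((cs.length : Int) - (r : Int))
              (if PySem.Chars.find cs ['#'] = -1 then ((cs.length : Nat) : Int)
                else PySem.Chars.find cs ['#'])
            have h2 : (cs.length : Int) < (r : Int) := Int.ofNat_lt.mpr hr
            omega)]
    simp [pvLoopA]
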